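-- pv_equiv track=rewrite | github.com/Gutiotomas/Analysis-Design-Algorithms | Module_3_Brute_Force_Search/Problem_D/heir_number.py | heir
-- ===== SOURCE A (Python) =====
-- from collections import Counter
--
-- def heir(num):
--     num_str = str(num)
--     n = len(num_str)
--
--     if n % 2 != 0:
--         return False
--
--     half_len = n // 2
--     num_digit_count = Counter(num_str)
--
--     for i in range(10**(half_len-1), 10**half_len):
--         if num % i == 0:
--             j = num // i
--             if len(str(i)) == half_len and len(str(j)) == half_len:
--                 combined_digit_count = Counter(str(i) + str(j))
--                 if combined_digit_count == num_digit_count: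
--                     return True
--     return False
-- ===== SOURCE B (Python) =====
-- def heir(num):
--     s = str(num)
--     n = len(s)
--     if n % 2 != 0:
--         return False
--     h = n // 2
--
--     def search(prefix, k, rest):
--         # prefix = numeric value of the digits chosen so far for the first factor,
--         # k = digits still to choose, rest = characters of s not yet used
--         if k == 0:
--             if num % prefix == 0:
--                 b = num // prefix
--                 return len(str(b)) == h and sorted(str(b)) == sorted(rest)
--             return False
--         for idx in range(len(rest)):
--             c = rest[idx]
--             if not ('0' <= c <= '9'):
--                 continue  # the first factor is a plain positive integer
--             if prefix == 0 and c == '0':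
--                 continue  # a leading zero would shorten the factor
--             if search(prefix * 10 + (ord(c) - 48), k - 1, rest[:idx] + rest[idx + 1:]):
--                 return True
--         return False
--
--     return search(0, h, s)
-- ===== Notes on version B (the rewrite author's own statement) =====
-- stated objective: alternative
-- what changed: A trial-divides num by every half-length candidate in an exponential-size integer range and compares digit Counters; B instead searches over arrangements of num's own characters, recursively choosing the first factor's digits one character at a time (building its value as it goes, pruning non-digit characters and a leading zero) and checking that the quotient's digits are exactly the unused characters.
import Mathlib
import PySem

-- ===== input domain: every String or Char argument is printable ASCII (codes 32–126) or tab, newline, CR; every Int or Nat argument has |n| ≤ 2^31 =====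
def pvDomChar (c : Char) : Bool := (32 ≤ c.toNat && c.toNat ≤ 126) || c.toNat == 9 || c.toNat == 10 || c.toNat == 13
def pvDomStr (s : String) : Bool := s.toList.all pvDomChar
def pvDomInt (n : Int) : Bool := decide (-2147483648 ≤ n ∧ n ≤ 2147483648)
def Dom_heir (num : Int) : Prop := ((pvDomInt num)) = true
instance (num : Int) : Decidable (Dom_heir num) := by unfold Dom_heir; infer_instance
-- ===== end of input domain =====

-- B replaces A's trial division over the whole half-length range by a recursive search over
-- arrangements of num's own characters (alternative algorithm, not claimed faster).

-- ===== PORT A =====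
-- Python's `Counter(..) == Counter(..)`: equal key sets and equal count per key
-- (exact for counters built from strings: all stored counts are positive).
def pyDictEq (d1 d2 : PySem.Dict Char Int) : Bool :=
  d1.keys.all (fun k => d2.getD k 0 == d1.getD k 0) &&
    d2.keys.all (fun k => d1.getD k 0 == d2.getD k 0)

def heir (num : Int) : Bool :=
  let numStr := PySem.Int.toChars num          -- num_str = str(num)
  let n := numStr.length                       -- n = len(num_str)
  if n % 2 != 0 then false
  else
    let halfLen := n / 2
    let numDigitCount := PySem.Dict.counter numStr
    -- str(num) is never empty, so half_len ≥ 1 on every reachable branch and the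
    -- Nat subtraction half_len - 1 agrees with Python's half_len - 1.
    (PySem.List.pyRange ((10:Int) ^ (halfLen - 1)) ((10:Int) ^ halfLen) 1).any (fun i =>
      if PySem.Int.mod num i == 0 then
        let j := PySem.Int.floordiv num i
        if ((PySem.Int.toChars i).length == halfLen) && ((PySem.Int.toChars j).length == halfLen) then
          pyDictEq (PySem.Dict.counter (PySem.Int.toChars i ++ PySem.Int.toChars j)) numDigitCount
        else false
      else false)

-- ===== PORT B =====
-- search(prefix, k, rest) from Source B; the for-loop with `return True` is `List.any`,
-- rest[idx] is `getD` (idx drawn from range(len(rest))), rest[:idx] + rest[idx+1:]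
-- is take ++ drop (exact: PySem.List.slice_to_natCast / slice_from_natCast).
def heirSearch (num : Int) (h : Nat) (pfx : Int) (k : Nat) (rest : List Char) : Bool :=
  match k with
  | 0 =>
    if PySem.Int.mod num pfx == 0 then
      let b := PySem.Int.floordiv num pfx
      ((PySem.Int.toChars b).length == h) &&
        (PySem.List.sorted (PySem.Int.toChars b) (fun x => x) false ==
          PySem.List.sorted rest (fun x => x) false)
    else false
  | k + 1 =>
    (List.range rest.length).any (fun idx =>
      let c := rest.getD idx ' '
      if !('0' ≤ c && c ≤ '9') then false
      else if pfx == 0 && c == '0' then false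
      else heirSearch num h (pfx * 10 + ((c.toNat : Int) - 48)) k (rest.take idx ++ rest.drop (idx + 1)))

def heir_alt (num : Int) : Bool :=
  let s := PySem.Int.toChars num
  let n := s.length
  if n % 2 != 0 then false
  else heirSearch num (n / 2) 0 (n / 2) s

-- ===== PRECONDITION & SPEC =====
def Spec_heir (num : Int) (out : Bool) : Prop := out = heir_alt num
instance (num : Int) (out : Bool) : Decidable (Spec_heir num out) := by unfold Spec_heir; infer_instance

-- ===== CLAIM (what is proved, stated in full; the proofs are below) =====
def Claim_equal_heir : Prop := ∀ (num : Int), Dom_heir num → Spec_heir num (heir num)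

-- ===== LEMMAS AND PROOFS =====

/-- a digit character -/
def isDig (c : Char) : Bool := '0' ≤ c && c ≤ '9'

/-- numeric value accumulated over a list of digit characters (B's `prefix`). -/
def valI (w : List Char) (a : Int) : Int := w.foldl (fun a c => a * 10 + ((c.toNat : Int) - 48)) a

/-- the canonical decimal digit string of a positive number. -/
def myDigits (m : Nat) : List Char := ((Nat.digits 10 m).map Nat.digitChar).reverse

/-- the final check of B's search, with the remainder list abstracted. -/
def FinalP (num : Int) (h : Nat) (a : Int) (rem : List Char) : Prop :=
  PySem.Int.mod num a = 0 ∧ (PySem.Int.toChars (PySem.Int.floordiv num a)).length = h ∧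
    (PySem.Int.toChars (PySem.Int.floordiv num a)).Perm rem

lemma toDigitsCore_eq : ∀ (f n : Nat) (acc : List Char), 0 < n → n < 10 ^ f →
    Nat.toDigitsCore 10 f n acc = myDigits n ++ acc := by
  intro f
  induction f with
  | zero => intro n acc hn hlt; simp at hlt; omega
  | succ f ih =>
    intro n acc hn hlt
    rw [Nat.toDigitsCore]
    by_cases h10 : n / 10 = 0
    · simp only [h10, if_true]
      have hn10 : n < 10 := by omega
      have : Nat.digits 10 n = [n % 10] := by
        rw [Nat.digits_def' (by norm_num) hn, h10, Nat.digits_zero]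
      simp [myDigits, this]
    · simp only [h10, if_false]
      rw [ih (n / 10) _ (by omega) (by
        rw [Nat.div_lt_iff_lt_mul (by norm_num : 0 < 10)]
        calc n < 10 ^ (f + 1) := hlt
          _ = 10 ^ f * 10 := by ring)]
      have : Nat.digits 10 n = n % 10 :: Nat.digits 10 (n / 10) := Nat.digits_def' (by norm_num) hn
      simp [myDigits, this]

lemma digitChar_isDig {d : Nat} (hd : d < 10) : isDig (Nat.digitChar d) = true := by
  interval_cases d <;> decide

lemma digitChar_dval {d : Nat} (hd : d < 10) : ((Nat.digitChar d).toNat : Int) - 48 = (d : Int) := by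
  interval_cases d <;> decide

lemma digitChar_ne_zero {d : Nat} (hd : d < 10) (h0 : d ≠ 0) : Nat.digitChar d ≠ '0' := by
  interval_cases d <;> simp_all <;> decide

lemma toChars_pos {i : Int} (hi : 1 ≤ i) : PySem.Int.toChars i = myDigits i.toNat := by
  have hneg : ¬ i < 0 := by omega
  rw [PySem.Int.toChars, if_neg hneg, Nat.toDigits,
    toDigitsCore_eq (i.toNat + 1) i.toNat [] (by omega)
      (lt_of_lt_of_le (Nat.lt_pow_self (by norm_num)) (Nat.pow_le_pow_right (by norm_num) (Nat.le_succ _))),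
    List.append_nil]

lemma toChars_digits {i : Int} (hi : 1 ≤ i) : ∀ c ∈ PySem.Int.toChars i, isDig c = true := by
  rw [toChars_pos hi]
  intro c hc
  simp only [myDigits, List.mem_reverse, List.mem_map] at hc
  obtain ⟨d, hd, rfl⟩ := hc
  exact digitChar_isDig (Nat.digits_lt_base (by norm_num) hd)

lemma toChars_ne_nil {i : Int} (hi : 1 ≤ i) : PySem.Int.toChars i ≠ [] := by
  rw [toChars_pos hi]
  simp [myDigits, Nat.digits_ne_nil_iff_ne_zero]
  omega

lemma toChars_head {i : Int} (hi : 1 ≤ i) : (PySem.Int.toChars i).head? ≠ some '0' := by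
  rw [toChars_pos hi]
  have hne : Nat.digits 10 i.toNat ≠ [] := by
    rw [Nat.digits_ne_nil_iff_ne_zero]; omega
  rw [myDigits, List.head?_reverse, List.getLast?_map,
    List.getLast?_eq_some_getLast hne]
  have hlast := Nat.getLast_digit_ne_zero 10 (m := i.toNat) (by omega)
  have hlt : (Nat.digits 10 i.toNat).getLast hne < 10 :=
    Nat.digits_lt_base (by norm_num) (List.getLast_mem hne)
  simp only [Option.map_some]
  intro hcon
  exact digitChar_ne_zero hlt hlast (by injection hcon)

lemma valI_myDigits (ds : List Nat) (hds : ∀ d ∈ ds, d < 10) :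
    valI ((ds.map Nat.digitChar).reverse) 0 = ((Nat.ofDigits 10 ds : Nat) : Int) := by
  induction ds with
  | nil => simp [valI, Nat.ofDigits]
  | cons d ds ih =>
    have hd : d < 10 := hds d (by simp)
    have ihh := ih (fun x hx => hds x (by simp [hx]))
    simp only [List.map_cons, List.reverse_cons]
    rw [valI, List.foldl_append]
    rw [valI] at ihh
    simp only [List.foldl_cons, List.foldl_nil, ihh, Nat.ofDigits_cons, digitChar_dval hd]
    push_cast
    ring

lemma valI_toChars {i : Int} (hi : 1 ≤ i) : valI (PySem.Int.toChars i) 0 = i := by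
  rw [toChars_pos hi, myDigits,
    valI_myDigits _ (fun d hd => Nat.digits_lt_base (by norm_num) hd),
    Nat.ofDigits_digits]
  omega

lemma isDig_dval {c : Char} (hc : isDig c = true) :
    0 ≤ (c.toNat : Int) - 48 ∧ (c.toNat : Int) - 48 ≤ 9 := by
  simp only [isDig, Bool.and_eq_true, decide_eq_true_eq, Char.le_def] at hc
  have h1 : ('0' : Char).val.toNat ≤ c.val.toNat := UInt32.le_iff_toNat_le.mp hc.1
  have h2 : c.val.toNat ≤ ('9' : Char).val.toNat := UInt32.le_iff_toNat_le.mp hc.2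
  have e0 : ('0' : Char).val.toNat = 48 := by decide
  have e9 : ('9' : Char).val.toNat = 57 := by decide
  simp only [Char.toNat]
  omega

lemma valI_bounds : ∀ (w : List Char) (a : Int), (∀ c ∈ w, isDig c = true) → 0 ≤ a →
    a * 10 ^ w.length ≤ valI w a ∧ valI w a < (a + 1) * 10 ^ w.length := by
  intro w
  induction w with
  | nil => intro a _ _; simp [valI]
  | cons c w ih =>
    intro a hdig ha
    have hd := isDig_dval (hdig c (by simp))
    have hrec : valI (c :: w) a = valI w (a * 10 + ((c.toNat : Int) - 48)) := rfl
    have ha' : 0 ≤ a * 10 + ((c.toNat : Int) - 48) := by nlinarith [hd.1]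
    obtain ⟨hl, hr⟩ := ih (a * 10 + ((c.toNat : Int) - 48)) (fun x hx => hdig x (by simp [hx])) ha'
    have hpow : (0:Int) < 10 ^ w.length := by positivity
    constructor
    · calc a * 10 ^ (c :: w).length = (a * 10) * 10 ^ w.length := by
            simp [List.length_cons]; ring
        _ ≤ (a * 10 + ((c.toNat : Int) - 48)) * 10 ^ w.length := by nlinarith [hd.1]
        _ ≤ valI (c :: w) a := by rw [hrec]; exact hl
    · calc valI (c :: w) a < (a * 10 + ((c.toNat : Int) - 48) + 1) * 10 ^ w.length := by
            rw [hrec]; exact hr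
        _ ≤ ((a + 1) * 10) * 10 ^ w.length := by nlinarith [hd.2]
        _ = (a + 1) * 10 ^ (c :: w).length := by simp [List.length_cons]; ring

lemma char_toNat_inj {c₁ c₂ : Char} (h : c₁.toNat = c₂.toNat) : c₁ = c₂ :=
  Char.ext (UInt32.toNat_inj.mp h)

lemma dval_pos {c : Char} (hc : isDig c = true) (h0 : c ≠ '0') : 1 ≤ (c.toNat : Int) - 48 := by
  have hdv := isDig_dval hc
  have h48 : ('0' : Char).toNat = 48 := by decide
  have hne0 : (c.toNat : Int) - 48 ≠ 0 := by
    intro hcon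
    exact h0 (char_toNat_inj (by omega))
  omega

lemma canonical_bounds {w : List Char} (hd : ∀ c ∈ w, isDig c = true) (hne : w ≠ [])
    (h0 : w.head? ≠ some '0') :
    (10:Int) ^ (w.length - 1) ≤ valI w 0 ∧ valI w 0 < (10:Int) ^ w.length := by
  obtain ⟨c, w', rfl⟩ := List.exists_cons_of_ne_nil hne
  have hc := hd c (by simp)
  have hdv := isDig_dval hc
  have hc0 : c ≠ '0' := by simpa using h0
  have h1 : 1 ≤ (c.toNat : Int) - 48 := dval_pos hc hc0
  have hrec : valI (c :: w') 0 = valI w' (0 * 10 + ((c.toNat : Int) - 48)) := rfl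
  obtain ⟨hl, hr⟩ := valI_bounds w' (0 * 10 + ((c.toNat : Int) - 48))
    (fun x hx => hd x (by simp [hx])) (by omega)
  have hpow : (0:Int) < 10 ^ w'.length := by positivity
  constructor
  · calc (10:Int) ^ ((c :: w').length - 1) = 10 ^ w'.length := by simp
      _ ≤ (0 * 10 + ((c.toNat : Int) - 48)) * 10 ^ w'.length := by nlinarith
      _ ≤ valI (c :: w') 0 := by rw [hrec]; exact hl
  · calc valI (c :: w') 0 < (0 * 10 + ((c.toNat : Int) - 48) + 1) * 10 ^ w'.length := by
          rw [hrec]; exact hr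
      _ ≤ 10 * 10 ^ w'.length := by nlinarith [hdv.2]
      _ = (10:Int) ^ (c :: w').length := by rw [List.length_cons]; ring

lemma valI_concat (w : List Char) (c : Char) (a : Int) :
    valI (w ++ [c]) a = valI w a * 10 + ((c.toNat : Int) - 48) := by
  simp [valI, List.foldl_append]

lemma valI_inj : ∀ (w₁ w₂ : List Char), (∀ c ∈ w₁, isDig c = true) → (∀ c ∈ w₂, isDig c = true) →
    w₁.length = w₂.length → valI w₁ 0 = valI w₂ 0 → w₁ = w₂ := by
  intro w₁
  induction w₁ using List.reverseRecOn with
  | nil =>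
    intro w₂ _ _ hlen _
    exact (List.eq_nil_of_length_eq_zero hlen.symm).symm
  | append_singleton w c ih =>
    intro w₂ hd₁ hd₂ hlen hval
    rcases List.eq_nil_or_concat w₂ with rfl | ⟨u, d, rfl⟩
    · simp at hlen
    · simp only [List.concat_eq_append] at hd₂ hlen hval ⊢
      rw [valI_concat, valI_concat] at hval
      have hc := isDig_dval (hd₁ c (by simp))
      have hdd := isDig_dval (hd₂ d (by simp))
      have hv : valI w 0 = valI u 0 ∧ (c.toNat : Int) - 48 = (d.toNat : Int) - 48 := by
        constructor <;> omega
      have hcd : c = d := char_toNat_inj (by omega)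
      have hlen' : w.length = u.length := by
        simp only [List.length_append, List.length_cons] at hlen; omega
      rw [ih u (fun x hx => hd₁ x (by simp [hx])) (fun x hx => hd₂ x (by simp [hx])) hlen' hv.1, hcd]

lemma toChars_valI {w : List Char} (hd : ∀ c ∈ w, isDig c = true) (hne : w ≠ [])
    (h0 : w.head? ≠ some '0') : PySem.Int.toChars (valI w 0) = w := by
  obtain ⟨hb1, hb2⟩ := canonical_bounds hd hne h0
  have ha : 1 ≤ valI w 0 := le_trans (one_le_pow₀ (by norm_num)) hb1
  have hdigs := toChars_digits ha
  have hhead := toChars_head ha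
  have hne' := toChars_ne_nil ha
  have hval := valI_toChars ha
  obtain ⟨hb1', hb2'⟩ := canonical_bounds hdigs hne' hhead
  rw [hval] at hb1' hb2'
  have hlen : (PySem.Int.toChars (valI w 0)).length = w.length := by
    have hl1 : 1 ≤ w.length := by
      cases w
      · simp at hne
      · simp
    have hl2 : 1 ≤ (PySem.Int.toChars (valI w 0)).length := by
      cases hx : PySem.Int.toChars (valI w 0)
      · exact absurd hx hne'
      · simp
    by_contra hcon
    rcases Nat.lt_or_ge (PySem.Int.toChars (valI w 0)).length w.length with h | h
    · have : (10:Int) ^ (PySem.Int.toChars (valI w 0)).length ≤ 10 ^ (w.length - 1) :=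
        pow_le_pow_right₀ (by norm_num) (by omega)
      omega
    · have h' : w.length < (PySem.Int.toChars (valI w 0)).length := by omega
      have : (10:Int) ^ w.length ≤ 10 ^ ((PySem.Int.toChars (valI w 0)).length - 1) :=
        pow_le_pow_right₀ (by norm_num) (by omega)
      omega
  exact valI_inj _ _ hdigs hd hlen (hval.trans rfl ▸ hval)

lemma pyDictEq_counter (x y : List Char) :
    pyDictEq (PySem.Dict.counter x) (PySem.Dict.counter y) = true ↔ x.Perm y := by
  rw [List.perm_iff_count]
  simp only [pyDictEq, Bool.and_eq_true, List.all_eq_true, PySem.Dict.keys_counter,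
    PySem.Dict.getD_counter, beq_iff_eq, Nat.cast_inj]
  constructor
  · rintro ⟨h1, h2⟩ a
    by_cases hx : a ∈ x
    · exact (h1 a ((PySem.Set.mem_ofList x a).mpr hx)).symm
    · by_cases hy : a ∈ y
      · exact (h2 a ((PySem.Set.mem_ofList y a).mpr hy))
      · rw [List.count_eq_zero_of_not_mem hx, List.count_eq_zero_of_not_mem hy]
  · intro h
    exact ⟨fun a _ => (h a).symm, fun a _ => h a⟩

lemma perm_idx {rest : List Char} {idx : Nat} (hidx : idx < rest.length) :
    rest.Perm (rest[idx] :: (rest.take idx ++ rest.drop (idx + 1))) := by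
  conv_lhs => rw [← List.take_append_drop idx rest, List.drop_eq_getElem_cons hidx]
  exact List.perm_middle

lemma heirSearch_iff (num : Int) (h : Nat) : ∀ (k : Nat) (rest : List Char) (pfx : Int), 0 ≤ pfx →
    (heirSearch num h pfx k rest = true ↔
      ∃ w rem, w.length = k ∧ (w ++ rem).Perm rest ∧ (∀ c ∈ w, isDig c = true) ∧
        (pfx = 0 → w.head? ≠ some '0') ∧ FinalP num h (valI w pfx) rem) := by
  intro k
  induction k with
  | zero =>
    intro rest pfx hpfx
    simp only [heirSearch]
    constructor
    · intro hb
      split at hb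
      case isTrue hmod =>
        refine ⟨[], rest, rfl, by simp, by simp, by simp, ?_⟩
        simp only [Bool.and_eq_true, beq_iff_eq] at hb
        refine ⟨by simpa using hmod, hb.1, ?_⟩
        exact (PySem.List.sorted_id_eq_sorted_id_iff_perm _ _).mp hb.2
      case isFalse => cases hb
    · rintro ⟨w, rem, hlen, hperm, _, _, hmod, hlenb, hpermb⟩
      have hw : w = [] := List.eq_nil_of_length_eq_zero hlen
      subst hw
      simp only [List.nil_append] at hperm
      have hval : valI [] pfx = pfx := rfl
      rw [hval] at hmod hlenb hpermb
      rw [if_pos (by simpa using hmod)]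
      simp only [Bool.and_eq_true, beq_iff_eq]
      exact ⟨hlenb, (PySem.List.sorted_id_eq_sorted_id_iff_perm _ _).mpr (hpermb.trans hperm)⟩
  | succ k ih =>
    intro rest pfx hpfx
    simp only [heirSearch, List.any_eq_true, List.mem_range]
    constructor
    · rintro ⟨idx, hidx, hbody⟩
      simp only [List.getD_eq_getElem rest ' ' hidx] at hbody
      split at hbody
      case isTrue => cases hbody
      case isFalse hg1 =>
        split at hbody
        case isTrue => cases hbody
        case isFalse hg2 =>
          have hdigc : isDig rest[idx] = true := by
            simp only [Bool.not_eq_true', Bool.not_eq_false] at hg1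
            exact hg1
          have hdvc := isDig_dval hdigc
          obtain ⟨w', rem, hlen', hperm', hdig', _, hfin⟩ :=
            (ih (rest.take idx ++ rest.drop (idx + 1)) (pfx * 10 + ((rest[idx].toNat : Int) - 48))
              (by omega)).mp hbody
          refine ⟨rest[idx] :: w', rem, by simp [hlen'], ?_, ?_, ?_, hfin⟩
          · exact (hperm'.cons rest[idx]).trans (perm_idx hidx).symm
          · intro c hc
            rcases List.mem_cons.mp hc with rfl | hc
            · exact hdigc
            · exact hdig' c hc
          · intro hp0
            simp only [List.head?_cons, ne_eq, Option.some.injEq]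
            intro hcon
            rw [hp0, hcon] at hg2
            simp at hg2
    · rintro ⟨w, rem, hlen, hperm, hdig, hhead, hfin⟩
      obtain ⟨c, w', rfl⟩ : ∃ c w', w = c :: w' := by
        cases w with
        | nil => simp at hlen
        | cons c w' => exact ⟨c, w', rfl⟩
      have hdigc : isDig c = true := hdig c (by simp)
      have hdvc := isDig_dval hdigc
      have hcmem : c ∈ rest := hperm.subset (by simp)
      obtain ⟨idx, hidx, hceq⟩ := List.mem_iff_getElem.mp hcmem
      refine ⟨idx, hidx, ?_⟩
      simp only [List.getD_eq_getElem rest ' ' hidx, hceq]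
      have hg1 : ('0' ≤ c && c ≤ '9') = true := hdigc
      rw [if_neg (by simp [hg1])]
      have hg2 : (pfx == 0 && c == '0') = false := by
        by_cases hp : pfx = 0
        · have := hhead hp
          simp only [List.head?_cons, ne_eq, Option.some.injEq] at this
          simp [hp, this]
        · simp [hp]
      rw [if_neg (by simp [hg2])]
      apply (ih (rest.take idx ++ rest.drop (idx + 1)) (pfx * 10 + ((c.toNat : Int) - 48))
        (by omega)).mpr
      refine ⟨w', rem, by simpa using hlen, ?_, fun x hx => hdig x (by simp [hx]), ?_, hfin⟩
      · have h1 : (c :: (w' ++ rem)).Perm (c :: (rest.take idx ++ rest.drop (idx + 1))) :=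
          hperm.trans (hceq ▸ perm_idx hidx)
        exact h1.cons_inv
      · intro hcon
        exfalso
        by_cases hp : pfx = 0
        · have hc0 : c ≠ '0' := by
            have := hhead hp
            simpa using this
          have := dval_pos hdigc hc0
          omega
        · have : 1 ≤ pfx := by omega
          omega

lemma toChars_ne_nil' (i : Int) : PySem.Int.toChars i ≠ [] := by
  by_cases hneg : i < 0
  · rw [PySem.Int.toChars, if_pos hneg]; simp
  · by_cases h1 : 1 ≤ i
    · exact toChars_ne_nil h1
    · have : i = 0 := by omega
      subst this; decide

theorem heir_eq (num : Int) : heir num = heir_alt num := by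
  rw [heir, heir_alt]
  by_cases hpar : (PySem.Int.toChars num).length % 2 = 0
  · rw [if_neg (by simp [hpar]), if_neg (by simp [hpar])]
    set s := PySem.Int.toChars num with hs
    set h := s.length / 2 with hh
    have hsne : s ≠ [] := toChars_ne_nil' num
    have hslen : 1 ≤ s.length := by
      exact Nat.pos_of_ne_zero (fun hc => hsne (List.eq_nil_of_length_eq_zero hc))
    have hge1 : 1 ≤ h := by rw [hh]; omega
    rw [Bool.eq_iff_iff, List.any_eq_true, heirSearch_iff num h h s 0 le_rfl]
    have hlo : (1:Int) ≤ (10:Int) ^ (h - 1) := one_le_pow₀ (by norm_num)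
    constructor
    · rintro ⟨i, hmem, hbody⟩
      obtain ⟨hlb, hub⟩ := PySem.List.mem_pyRange_one.mp hmem
      have hi1 : 1 ≤ i := le_trans hlo hlb
      by_cases hm : PySem.Int.mod num i = 0
      · rw [if_pos (by simpa using hm)] at hbody
        by_cases hl : (((PySem.Int.toChars i).length == h) &&
            ((PySem.Int.toChars (PySem.Int.floordiv num i)).length == h)) = true
        · rw [if_pos hl] at hbody
          simp only [Bool.and_eq_true, beq_iff_eq] at hl
          refine ⟨PySem.Int.toChars i, PySem.Int.toChars (PySem.Int.floordiv num i), hl.1, ?_,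
            toChars_digits hi1, fun _ => toChars_head hi1, ?_⟩
          · exact (pyDictEq_counter _ _).mp hbody
          · rw [valI_toChars hi1]
            exact ⟨hm, hl.2, List.Perm.refl _⟩
        · rw [if_neg hl] at hbody; cases hbody
      · rw [if_neg (by simpa using hm)] at hbody; cases hbody
    · rintro ⟨w, rem, hlen, hperm, hdig, hhead, hmod, hlenb, hpermb⟩
      have hwne : w ≠ [] := by
        intro hcon; rw [hcon] at hlen; simp at hlen; omega
      have hh0 := hhead rfl
      obtain ⟨hb1, hb2⟩ := canonical_bounds hdig hwne hh0
      rw [hlen] at hb1 hb2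
      have hca : PySem.Int.toChars (valI w 0) = w := toChars_valI hdig hwne hh0
      refine ⟨valI w 0, PySem.List.mem_pyRange_one.mpr ⟨hb1, hb2⟩, ?_⟩
      rw [if_pos (by simpa using hmod)]
      have hif2 : (((PySem.Int.toChars (valI w 0)).length == h) &&
          ((PySem.Int.toChars (PySem.Int.floordiv num (valI w 0))).length == h)) = true := by
        simp only [Bool.and_eq_true, beq_iff_eq]
        exact ⟨by rw [hca, hlen], hlenb⟩
      rw [if_pos hif2]
      apply (pyDictEq_counter _ _).mpr
      rw [hca]
      exact (hpermb.append_left w).trans hperm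
  · rw [if_pos (by simpa using hpar), if_pos (by simpa using hpar)]

-- ===== VERDICT (by name: the statement is the Claim_ definition above) =====
theorem heir_spec : Claim_equal_heir := fun num _ => heir_eq num
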